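-- pv_equiv track=rewrite | github.com/lucvs07/Problem-Solving-Solutions | HackerRank/StrangeCounter.py | strangeCounter
-- ===== SOURCE A (Python) =====
-- def strangeCounter(t):
--     # Write your code here
--     start = 1
--     val = 3
--     while start + val <= t:
--         start = start + val
--         val *= 2
--     res = val - (t - start)
--     return res
-- ===== SOURCE B (Python) =====
-- def strangeCounter(t):
--     # O(1) closed form: cycle k has start 3*2**k - 2 and initial value 3*2**k.
--     m = (t + 2) // 3
--     k = 0 if m < 2 else m.bit_length() - 1
--     p = 3 * 2 ** k
--     return 2 * p - 2 - t
-- ===== Notes on version B (the rewrite author's own statement) =====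
-- stated objective: faster
-- what changed: Replaces A's geometric-doubling while-loop with a closed form: the cycle index is computed directly with integer bit_length arithmetic, so no loop runs (asymptotically O(1) vs O(log t), though both are too fast for a timing run to measure).
import Mathlib
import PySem

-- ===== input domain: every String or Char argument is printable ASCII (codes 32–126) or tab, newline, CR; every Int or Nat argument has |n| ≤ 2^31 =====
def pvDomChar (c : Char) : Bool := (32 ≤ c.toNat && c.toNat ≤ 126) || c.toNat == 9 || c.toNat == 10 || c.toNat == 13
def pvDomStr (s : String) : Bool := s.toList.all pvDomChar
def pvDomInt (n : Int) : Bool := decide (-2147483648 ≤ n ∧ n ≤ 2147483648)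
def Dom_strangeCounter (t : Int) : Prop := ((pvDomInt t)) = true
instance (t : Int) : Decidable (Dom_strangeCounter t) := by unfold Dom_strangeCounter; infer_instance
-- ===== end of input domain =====

-- B replaces A's doubling while-loop by an O(1) closed form using bit_length.

-- ===== PORT A =====
-- the while-loop of A: while start + val <= t: start += val; val *= 2
-- (the 0 < val hypothesis is only for termination; it is invariant from val = 3)
def loopA (t start val : Int) (h : 0 < val) : Int × Int :=
  if start + val ≤ t then
    loopA t (start + val) (val * 2) (by omega)
  else (start, val)
termination_by (t + 1 - start).toNat
decreasing_by omega

def strangeCounter (t : Int) : Int :=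
  let sv := loopA t 1 3 (by norm_num)
  sv.2 - (t - sv.1)

-- ===== PORT B =====
def strangeCounter_alt (t : Int) : Int :=
  let m := PySem.Int.floordiv (t + 2) 3
  let k : Nat := if m < 2 then 0 else PySem.Int.bitLength m - 1
  let p : Int := 3 * 2 ^ k
  2 * p - 2 - t

-- ===== PRECONDITION & SPEC =====
def Spec_strangeCounter (t : Int) (out : Int) : Prop := out = strangeCounter_alt t
instance (t : Int) (out : Int) : Decidable (Spec_strangeCounter t out) := by unfold Spec_strangeCounter; infer_instance

-- ===== CLAIM (what is proved, stated in full; the proofs are below) =====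
def Claim_equal_strangeCounter : Prop := ∀ (t : Int), Dom_strangeCounter t → Spec_strangeCounter t (strangeCounter t)

-- ===== LEMMAS AND PROOFS =====

-- B's cycle index, as a standalone function for the proofs
def kB (t : Int) : Nat :=
  if PySem.Int.floordiv (t + 2) 3 < 2 then 0
  else PySem.Int.bitLength (PySem.Int.floordiv (t + 2) 3) - 1

lemma floordiv_bracket (t : Int) :
    3 * PySem.Int.floordiv (t + 2) 3 ≤ t + 2 ∧ t + 2 < 3 * PySem.Int.floordiv (t + 2) 3 + 3 := by
  have h := (PySem.Int.floordiv_eq_iff_of_pos (a := t + 2) (b := 3)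
      (q := PySem.Int.floordiv (t + 2) 3) (by norm_num)).mp rfl
  constructor <;> nlinarith [h.1, h.2]

lemma bitLength_pos_of_two_le {m : Int} (hm : 2 ≤ m) : 1 ≤ PySem.Int.bitLength m := by
  by_contra h
  have hb : PySem.Int.bitLength m = 0 := by omega
  have := PySem.Int.lt_two_pow_bitLength m
  rw [hb] at this
  simp at this
  omega

-- stop condition: at j = kB t the loop guard fails
lemma kB_stop (t : Int) : m₀ = PySem.Int.floordiv (t + 2) 3 → m₀ < (2:Int) ^ (kB t + 1) := by
  intro hm
  unfold kB
  rw [← hm]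
  split_ifs with h
  · simpa using by omega
  · push Not at h
    have h1 := PySem.Int.lt_two_pow_bitLength m₀
    have h2 := bitLength_pos_of_two_le h
    have hk : PySem.Int.bitLength m₀ - 1 + 1 = PySem.Int.bitLength m₀ := by omega
    rw [hk]
    have habs : m₀.natAbs = m₀.toNat := by omega
    calc m₀ = (m₀.natAbs : Int) := by omega
      _ < ((2 ^ PySem.Int.bitLength m₀ : Nat) : Int) := by exact_mod_cast h1
      _ = (2:Int) ^ PySem.Int.bitLength m₀ := by push_cast; ring

-- step condition: below kB t the loop guard holds
lemma kB_step (t : Int) (j : Nat) (hj : j < kB t) :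
    (2:Int) ^ (j + 1) ≤ PySem.Int.floordiv (t + 2) 3 := by
  set m₀ := PySem.Int.floordiv (t + 2) 3 with hm
  unfold kB at hj
  rw [← hm] at hj
  split_ifs at hj with h
  · omega
  · push Not at h
    have h2 := PySem.Int.two_pow_bitLength_le m₀ (by omega)
    have habs : (m₀.natAbs : Int) = m₀ := by omega
    calc (2:Int) ^ (j + 1) ≤ (2:Int) ^ (PySem.Int.bitLength m₀ - 1) := by
          apply pow_le_pow_right₀ (by norm_num); omega
      _ = ((2 ^ (PySem.Int.bitLength m₀ - 1) : Nat) : Int) := by push_cast; ring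
      _ ≤ (m₀.natAbs : Int) := by exact_mod_cast h2
      _ = m₀ := habs

lemma loopA_run (t : Int) :
    ∀ (d j : Nat) (hp : (0:Int) < 3 * 2 ^ j), j + d = kB t →
      loopA t (3 * 2 ^ j - 2) (3 * 2 ^ j) hp = (3 * 2 ^ kB t - 2, 3 * 2 ^ kB t) := by
  intro d
  induction d with
  | zero =>
    intro j hp hj
    have hstop := kB_stop t (m₀ := PySem.Int.floordiv (t + 2) 3) rfl
    have hbr := floordiv_bracket t
    rw [loopA]
    rw [if_neg]
    · have : j = kB t := by omega
      rw [this]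
    · push Not
      rw [← hj] at hstop

      have : t + 2 < 3 * (2:Int) ^ (j + 1) := by nlinarith [hstop, hbr.2]
      have hpow : (2:Int) ^ (j + 1) = 2 ^ j * 2 := by rw [pow_succ]
      nlinarith [this, hpow]
  | succ d ih =>
    intro j hp hj
    have hstep := kB_step t j (by omega)
    have hbr := floordiv_bracket t
    rw [loopA]
    rw [if_pos]
    · have e1 : 3 * (2:Int) ^ j - 2 + 3 * 2 ^ j = 3 * 2 ^ (j + 1) - 2 := by rw [pow_succ]; ring
      have e2 : 3 * (2:Int) ^ j * 2 = 3 * 2 ^ (j + 1) := by rw [pow_succ]; ring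
      rw [show loopA t (3 * 2 ^ j - 2 + 3 * 2 ^ j) (3 * 2 ^ j * 2) (by omega)
            = loopA t (3 * 2 ^ (j + 1) - 2) (3 * 2 ^ (j + 1)) (by positivity) from by
        congr 1]
      exact ih (j + 1) (by positivity) (by omega)
    · have : 3 * (2:Int) ^ (j + 1) ≤ t + 2 := by nlinarith [hstep, hbr.1]
      have hpow : (2:Int) ^ (j + 1) = 2 ^ j * 2 := by rw [pow_succ]
      nlinarith [this, hpow]

-- ===== VERDICT (by name: the statement is the Claim_ definition above) =====
theorem strangeCounter_spec : Claim_equal_strangeCounter := by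
  intro t _
  unfold Spec_strangeCounter strangeCounter strangeCounter_alt
  have h0 : loopA t 1 3 (by norm_num) = (3 * 2 ^ kB t - 2, 3 * 2 ^ kB t) := by
    have := loopA_run t (kB t) 0 (by norm_num) (by omega)
    simpa using this
  rw [h0]
  simp only [kB]
  split_ifs <;> ring
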